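-- pv_equiv track=rewrite | github.com/joravery/adventOfCode2022 | day_05/puzzle_01/solution.py | create_initial_stacks
-- ===== SOURCE A (Python) =====
-- import math
--
-- def create_initial_stacks(stack_rows: list):
--     '''
--     Parser to create a list of lists representing starting package stacks.
--     Creates an empty first element to make indexing easier when processing the move instructions
--     '''
--     stacks = []
--     # Each stack is represented by 4 characters, and each row has a \n which requires taking the floor
--     num_stacks = int(math.floor(len(stack_rows[0])/4))
--
--     # Add an extra empty array here
--     for i in range(0, num_stacks+1):
--         stacks.append([])
--
--     for row in stack_rows:
--         for i in range(0, num_stacks):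
--             box = row[i*4 +1]
--             if box != " ":
--                 # place the box into a 1-indexed system instead of 0
--                 stacks[i+1].insert(0, box)
--
--     return stacks
-- ===== SOURCE B (Python) =====
-- def create_initial_stacks(stack_rows: list):
--     """Recursive column-major rebuild: each stack is built bottom-up by structural
--     recursion on the rows, so no insert(0) is needed."""
--     num_stacks = len(stack_rows[0]) // 4
--     return [[]] + _columns(stack_rows, 0, num_stacks)
--
--
-- def _columns(rows, i, n):
--     if i >= n:
--         return []
--     return [_stack(rows, i)] + _columns(rows, i + 1, n)
--
--
-- def _stack(rows, i):
--     if not rows: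
--         return []
--     box = rows[0][i * 4 + 1]
--     rest = _stack(rows[1:], i)
--     return rest if box == " " else rest + [box]
-- ===== Notes on version B (the rewrite author's own statement) =====
-- stated objective: alternative
-- what changed: Replaces A's imperative row-major double loop that insert(0)s each box at the front of a mutated stacks list with a purely functional recursive column-major rebuild: helper _columns recurses over stack indices and helper _stack builds each stack independently bottom-up by structural recursion over the rows, so no mutation and no insert(0) is needed.
import Mathlib
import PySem

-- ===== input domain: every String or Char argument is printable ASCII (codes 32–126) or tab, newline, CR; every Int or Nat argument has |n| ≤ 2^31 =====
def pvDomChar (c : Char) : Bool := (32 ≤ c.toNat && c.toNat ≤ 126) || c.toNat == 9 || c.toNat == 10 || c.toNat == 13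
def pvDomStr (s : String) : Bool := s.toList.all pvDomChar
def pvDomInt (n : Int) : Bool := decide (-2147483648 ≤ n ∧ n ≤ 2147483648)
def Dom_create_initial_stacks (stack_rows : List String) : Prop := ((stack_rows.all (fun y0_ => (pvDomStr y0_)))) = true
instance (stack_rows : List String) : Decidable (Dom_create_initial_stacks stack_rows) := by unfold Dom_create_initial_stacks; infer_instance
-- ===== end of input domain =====

-- B rebuilds the stacks by recursive helpers, column-major (each stack built bottom-up by
-- structural recursion over the rows), replacing A's imperative row-major loop with
-- insert(0); return-value equivalence.

-- ===== PORT A =====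
def create_initial_stacks (stack_rows : List String) : List (List String) :=
  match PySem.List.pyGet? stack_rows 0 with
  | none => []  -- stack_rows[0] raises IndexError; excluded by Pre_
  | some row0 =>
    let num_stacks : Int := PySem.Int.floordiv (PySem.Str.len row0) 4
    let sts : List (List String) :=
      (PySem.List.pyRange 0 (num_stacks + 1) 1).foldl (fun s _ => s ++ [[]]) []
    stack_rows.foldl (fun sts row =>
      (PySem.List.pyRange 0 num_stacks 1).foldl (fun sts i =>
        match PySem.Str.pyGet? row (i * 4 + 1) with
        | none => sts  -- row[i*4+1] raises IndexError; excluded by Pre_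
        | some box =>
          if box ≠ ' ' then
            PySem.List.pySetD sts (i + 1)
              (String.ofList [box] :: PySem.List.pyGetD sts (i + 1) [])
          else sts) sts) sts

-- ===== PORT B =====
-- Python helper _stack: builds column i bottom-up by structural recursion on the rows
def pvB_stack : List String → Int → List String
  | [], _ => []
  | r :: rs, i =>
    match PySem.Str.pyGet? r (i * 4 + 1) with
    | none => pvB_stack rs i  -- rows[0][i*4+1] raises IndexError; excluded by Pre_
    | some box =>
      let rest := pvB_stack rs i
      if box = ' ' then rest else rest ++ [String.ofList [box]]

-- Python helper _columns: recursion over the stack indices i < n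
def pvB_columns (rows : List String) (i n : Int) : List (List String) :=
  if i ≥ n then []
  else pvB_stack rows i :: pvB_columns rows (i + 1) n
termination_by (n - i).toNat
decreasing_by omega

def create_initial_stacks_alt (stack_rows : List String) : List (List String) :=
  match PySem.List.pyGet? stack_rows 0 with
  | none => []  -- len(stack_rows[0]) raises IndexError; excluded by Pre_
  | some row0 =>
    [] :: pvB_columns stack_rows 0 (PySem.Int.floordiv (PySem.Str.len row0) 4)

-- ===== PRECONDITION & SPEC =====
-- Pre_ excludes exactly the inputs where Python A raises IndexError: the empty list
-- (stack_rows[0]) and lists with a row too short for some read row[i*4+1], i < num_stacks.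
def Pre_create_initial_stacks (stack_rows : List String) : Prop :=
  stack_rows ≠ [] ∧ ∀ r ∈ stack_rows,
    4 * ((stack_rows.headD "").toList.length / 4) ≤ r.toList.length + 2
instance (stack_rows : List String) : Decidable (Pre_create_initial_stacks stack_rows) := by
  unfold Pre_create_initial_stacks; infer_instance

def pvWitness_create_initial_stacks : List String := ["[A] [B]", "[C] [ ]"]

def Spec_create_initial_stacks (stack_rows : List String) (out : List (List String)) : Prop := out = create_initial_stacks_alt stack_rows
instance (stack_rows : List String) (out : List (List String)) : Decidable (Spec_create_initial_stacks stack_rows out) := by unfold Spec_create_initial_stacks; infer_instance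

-- ===== CLAIM (what is proved, stated in full; the proofs are below) =====
def Claim_equal_create_initial_stacks : Prop := ∀ (stack_rows : List String), Dom_create_initial_stacks stack_rows → Pre_create_initial_stacks stack_rows → Spec_create_initial_stacks stack_rows (create_initial_stacks stack_rows)

-- ===== LEMMAS AND PROOFS =====

-- the per-cell read both programs do: row[i*4+1], kept if not a blank
def pvPick (k : Nat) (row : String) : Option String :=
  match row.toList[k * 4 + 1]? with
  | none => none
  | some box => if box ≠ ' ' then some (String.ofList [box]) else none

-- A's inner-loop body, on one column index
def pvStep (row : String) (sts : List (List String)) (i : Int) : List (List String) :=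
  match PySem.Str.pyGet? row (i * 4 + 1) with
  | none => sts
  | some box =>
    if box ≠ ' ' then
      PySem.List.pySetD sts (i + 1)
        (String.ofList [box] :: PySem.List.pyGetD sts (i + 1) [])
    else sts

def pvUpd (row : String) (k : Nat) (c : List String) : List String :=
  match pvPick k row with
  | none => c
  | some b => b :: c

theorem pvUpd_eq_toList_append (row : String) (k : Nat) (c : List String) :
    pvUpd row k c = (pvPick k row).toList ++ c := by
  unfold pvUpd; cases pvPick k row <;> simp

theorem pv_n_eq (row0 : String) :
    PySem.Int.floordiv (PySem.Str.len row0) 4 = ((row0.toList.length / 4 : Nat) : Int) := by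
  simp only [PySem.Int.floordiv, PySem.Str.len_eq]
  rw [Int.fdiv_eq_ediv]
  simp

theorem pv_init_foldl {α : Type} (l : List α) (s : List (List String)) :
    l.foldl (fun s _ => s ++ [[]]) s = s ++ List.replicate l.length ([] : List String) := by
  induction l generalizing s with
  | nil => simp
  | cons x xs ih =>
    rw [List.foldl_cons, ih]
    simp [List.replicate_succ, List.append_assoc]

theorem pv_replicate_eq_map_range (N : Nat) :
    List.replicate N ([] : List String) = (List.range N).map (fun _ => []) := by
  simp [List.map_const']

theorem pv_set_map_range {α : Type} (N m : Nat) (_hm : m < N) (g : Nat → α) (v : α) :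
    ((List.range N).map g).set m v = (List.range N).map (fun i => if i = m then v else g i) := by
  apply List.ext_getElem
  · simp
  · intro i h1 h2
    simp only [List.getElem_set, List.getElem_map, List.getElem_range]
    by_cases h : m = i
    · simp [h]
    · simp [h, Ne.symm h]

theorem pv_step_on (row : String) (N m : Nat) (hm : m < N)
    (hlen : m * 4 + 1 < row.toList.length) (g : Nat → List String) :
    pvStep row ([] :: (List.range N).map g) ↑m
      = [] :: (List.range N).map (fun i => if i = m then pvUpd row m (g m) else g i) := by
  unfold pvStep
  have hc1 : ((m : Int) * 4 + 1) = ((m * 4 + 1 : Nat) : Int) := by push_cast; ring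
  have hc2 : ((m : Int) + 1) = ((m + 1 : Nat) : Int) := by push_cast; ring
  rw [hc1, PySem.Str.pyGet?_natCast, List.getElem?_eq_getElem hlen]
  by_cases hb : row.toList[m * 4 + 1] = ' '
  · simp only [hb, ne_eq, not_true_eq_false, if_false]
    congr 1
    apply List.map_congr_left
    intro i hi
    by_cases h : i = m
    · subst h; simp [pvUpd, pvPick, List.getElem?_eq_getElem hlen, hb]
    · simp [h]
  · simp only [ne_eq, hb, not_false_eq_true, if_pos, hc2, PySem.List.pySetD_natCast,
      PySem.List.pyGetD_natCast]
    have hget : (([] :: (List.range N).map g).getD (m + 1) []) = g m := by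
      simp [List.getD, hm]
    have hset : (([] :: (List.range N).map g).set (m + 1)
        (String.ofList [row.toList[m * 4 + 1]] :: g m))
        = [] :: ((List.range N).map g).set m (String.ofList [row.toList[m * 4 + 1]] :: g m) := by
      simp [List.set_cons_succ]
    rw [hget, hset, pv_set_map_range N m hm]
    congr 1
    apply List.map_congr_left
    intro i hi
    by_cases h : i = m
    · subst h; simp [pvUpd, pvPick, List.getElem?_eq_getElem hlen, hb]
    · simp [h]

theorem pv_inner_aux (row : String) (N : Nat)
    (hrow : ∀ k < N, k * 4 + 1 < row.toList.length) :
    ∀ (mrem m : Nat), m + mrem = N → ∀ g : Nat → List String,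
    (PySem.List.pyRange ↑m ↑N 1).foldl (pvStep row) ([] :: (List.range N).map g)
      = [] :: (List.range N).map (fun i => if m ≤ i then pvUpd row i (g i) else g i) := by
  intro mrem
  induction mrem with
  | zero =>
    intro m hm g
    have hmN : m = N := by omega
    subst hmN
    rw [PySem.List.pyRange_one_eq_nil (by omega)]
    simp only [List.foldl_nil]
    congr 1
    apply List.map_congr_left
    intro i hi
    simp at hi
    rw [if_neg (by omega)]
  | succ k ih =>
    intro m hm g
    have hmN : m < N := by omega
    rw [PySem.List.pyRange_one_cons (by exact_mod_cast hmN)]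
    rw [List.foldl_cons]
    rw [pv_step_on row N m hmN (hrow m hmN) g]
    have hc : ((m : Int) + 1) = ((m + 1 : Nat) : Int) := by push_cast; ring
    rw [hc, ih (m + 1) (by omega)]
    congr 1
    apply List.map_congr_left
    intro i hi
    simp at hi
    by_cases h : i = m
    · subst h
      rw [if_neg (by omega), if_pos (by omega), if_pos (le_refl i)]
    · by_cases h2 : m + 1 ≤ i
      · rw [if_pos h2, if_neg h, if_pos (by omega)]
      · rw [if_neg h2, if_neg h, if_neg (by omega)]

theorem pv_inner (row : String) (N : Nat)
    (hrow : ∀ k < N, k * 4 + 1 < row.toList.length) (g : Nat → List String) :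
    (PySem.List.pyRange 0 ↑N 1).foldl (pvStep row) ([] :: (List.range N).map g)
      = [] :: (List.range N).map (fun i => pvUpd row i (g i)) := by
  have h := pv_inner_aux row N hrow N 0 (by omega) g
  simpa using h

theorem pv_outer (N : Nat) (rs : List String)
    (hrs : ∀ r ∈ rs, ∀ k < N, k * 4 + 1 < r.toList.length) (g : Nat → List String) :
    rs.foldl (fun sts row => (PySem.List.pyRange 0 ↑N 1).foldl (pvStep row) sts)
        ([] :: (List.range N).map g)
      = [] :: (List.range N).map (fun i => rs.reverse.filterMap (fun r => pvPick i r) ++ g i) := by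
  induction rs generalizing g with
  | nil => simp
  | cons r rest ih =>
    rw [List.foldl_cons, pv_inner r N (hrs r (by simp)) g]
    rw [ih (fun r hr => hrs r (by simp [hr]))]
    congr 1
    apply List.map_congr_left
    intro i hi
    rw [pvUpd_eq_toList_append]
    simp only [List.reverse_cons, List.filterMap_append, List.append_assoc]
    cases h : pvPick i r <;> simp [h]

-- B's _stack builds exactly the filterMap over the reversed rows
theorem pvB_stack_eq (k : Nat) : ∀ rows : List String,
    pvB_stack rows ↑k = rows.reverse.filterMap (fun r => pvPick k r) := by
  intro rows
  induction rows with
  | nil => simp [pvB_stack]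
  | cons r rs ih =>
    have hc : ((k : Int) * 4 + 1) = ((k * 4 + 1 : Nat) : Int) := by push_cast; ring
    simp only [pvB_stack, hc, PySem.Str.pyGet?_natCast, List.reverse_cons,
      List.filterMap_append, ih]
    cases h : r.toList[k * 4 + 1]? with
    | none => simp [pvPick, h]
    | some box =>
      by_cases hb : box = ' '
      · simp [pvPick, h, hb]
      · simp [pvPick, h, hb]

-- B's _columns enumerates the stack indices m, m+1, …, N-1
theorem pvB_columns_eq (rows : List String) (N : Nat) :
    ∀ (d m : Nat), m + d = N →
    pvB_columns rows ↑m ↑N = (List.range' m d).map (fun k => pvB_stack rows ↑k) := by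
  intro d
  induction d with
  | zero =>
    intro m hm
    rw [pvB_columns, if_pos (by omega)]
    simp
  | succ d ih =>
    intro m hm
    rw [pvB_columns, if_neg (by omega)]
    have hc : ((m : Int) + 1) = ((m + 1 : Nat) : Int) := by push_cast; ring
    rw [hc, ih (m + 1) (by omega), List.range'_succ]
    simp

-- ===== VERDICT (by name: the statement is the Claim_ definition above) =====
theorem create_initial_stacks_spec : Claim_equal_create_initial_stacks := by
  intro rows hdom hpre
  unfold Spec_create_initial_stacks
  obtain ⟨hne, hlen⟩ := hpre
  cases rows with
  | nil => exact absurd rfl hne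
  | cons r0 rest =>
    clear hne hdom
    set N := r0.toList.length / 4 with hN
    have hrow : ∀ r ∈ r0 :: rest, ∀ k < N, k * 4 + 1 < r.toList.length := by
      intro r hr k hk
      have h1 := hlen r hr
      simp only [List.headD_cons] at h1
      omega
    have hc1 : ((N : Int) + 1) = ((N + 1 : Nat) : Int) := by push_cast; ring
    have hinit : (PySem.List.pyRange 0 ((N : Int) + 1) 1).foldl
        (fun s _ => s ++ [[]]) ([] : List (List String))
        = [] :: (List.range N).map (fun _ => ([] : List String)) := by
      rw [pv_init_foldl]
      have hlenr : (PySem.List.pyRange 0 ((N : Int) + 1) 1).length = N + 1 := by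
        rw [hc1, PySem.List.pyRange_zero_nat]; simp
      rw [hlenr, List.replicate_succ, pv_replicate_eq_map_range]
      simp
    have hA : create_initial_stacks (r0 :: rest)
        = (r0 :: rest).foldl
            (fun sts row => (PySem.List.pyRange 0 (N : Int) 1).foldl (pvStep row) sts)
            ([] :: (List.range N).map (fun _ => [])) := by
      simp only [create_initial_stacks, PySem.List.pyGet?_zero_cons, pv_n_eq, ← hN, hinit]
      rfl
    have hB : create_initial_stacks_alt (r0 :: rest)
        = [] :: pvB_columns (r0 :: rest) 0 ↑N := by
      simp only [create_initial_stacks_alt, PySem.List.pyGet?_zero_cons, pv_n_eq, ← hN]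
    have hcols := pvB_columns_eq (r0 :: rest) N N 0 (by omega)
    rw [hA, pv_outer N (r0 :: rest) hrow (fun _ => []), hB]
    rw [show ((0 : Int)) = ((0 : Nat) : Int) from rfl, hcols]
    simp only [List.append_nil]
    congr 1
    rw [List.range_eq_range']
    simp only [bind_pure_comp, List.map_eq_map, List.map_map]
    apply List.map_congr_left
    intro k hk
    rw [Function.comp_apply, pvB_stack_eq]
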